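-- pv_equiv track=rewrite | github.com/codesthenos/RomanNumbers | tools_is_roman_expression.py | input_string_into_special_list
-- ===== SOURCE A (Python) =====
-- from enum import Enum
--
-- class RomanNumbers(Enum):
--   I      = 1
--   IV     = 4
--   V      = 5
--   IX     = 9
--   X      = 10
--   XL     = 40
--   L      = 50
--   XC     = 90
--   C      = 100
--   CD     = 400
--   D      = 500
--   CM     = 900
--   M      = 1000
--   MV0    = 4000
--   V0     = 5000
--   X0     = 10000
--   X0L0   = 40000
--   L0     = 50000
--   C0     = 100000
--   C0D0   = 400000
--   D0     = 500000
--   M0     = 1000000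
--   M0V00  = 4000000
--   V00    = 5000000
--   X00    = 10000000
--   X00L00 = 40000000
--   L00    = 50000000
--   C00    = 100000000
--   C00D00 = 400000000
--   D00    = 500000000
--   M00    = 1000000000
--
-- def input_string_into_special_list(string):
--   special_list = []
--   max_token_lenght = max(len(token.name) for token in RomanNumbers)
--   index = 0
--   while index < len(string):
--     found = False
--     for token_length in range(max_token_lenght, 0, -1):
--       if index + token_length <= len(string) and string[index:index+token_length] in RomanNumbers.__members__:
--         special_list.append(string[index:index+token_length])
--         index += token_length
--         found = True
--         break
--     if not found:
--       special_list.append(string[index])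
--       index += 1
--   return special_list
-- ===== SOURCE B (Python) =====
-- # B: trie-style forward scan — at each position extend the match one char at a
-- # time through a precomputed prefix set, remembering the longest full token.
-- _NAMES = ("I", "IV", "V", "IX", "X", "XL", "L", "XC", "C", "CD", "D", "CM", "M",
--           "MV0", "V0", "X0", "X0L0", "L0", "C0", "C0D0", "D0", "M0", "M0V00",
--           "V00", "X00", "X00L00", "L00", "C00", "C00D00", "D00", "M00")
-- _TOKENS = set(_NAMES)
-- _PREFIXES = {name[:k + 1] for name in _NAMES for k in range(len(name))}
--
-- def input_string_into_special_list(string):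
--   out = []
--   i = 0
--   n = len(string)
--   while i < n:
--     best = 0
--     j = i
--     while j < n and string[i:j + 1] in _PREFIXES:
--       j += 1
--       if string[i:j] in _TOKENS:
--         best = j - i
--     if best:
--       out.append(string[i:i + best])
--       i += best
--     else:
--       out.append(string[i])
--       i += 1
--   return out
-- ===== Notes on version B (the rewrite author's own statement) =====
-- stated objective: faster
-- what changed: A probes each position with up to 6 descending fixed-length slices, each tested by a linear scan of the 31 member names; B precomputes a token set and a prefix set (a flattened trie) once and does a single early-stopping forward character walk per position, remembering the longest prefix that is a full token.
import Mathlib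
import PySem

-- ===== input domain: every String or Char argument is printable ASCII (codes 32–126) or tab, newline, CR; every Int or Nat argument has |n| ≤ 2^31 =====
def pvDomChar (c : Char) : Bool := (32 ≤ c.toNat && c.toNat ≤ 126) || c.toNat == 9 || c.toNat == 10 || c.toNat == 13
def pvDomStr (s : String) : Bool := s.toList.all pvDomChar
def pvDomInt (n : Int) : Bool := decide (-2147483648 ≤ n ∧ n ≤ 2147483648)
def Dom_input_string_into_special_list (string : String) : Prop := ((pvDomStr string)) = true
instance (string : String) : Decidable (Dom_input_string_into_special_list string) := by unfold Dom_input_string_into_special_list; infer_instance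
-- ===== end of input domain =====

-- B replaces A's descending fixed-length probes at each position by a single forward
-- walk through a precomputed prefix set (trie-style), recording the longest full token.

-- ===== PORT A =====
-- the RomanNumbers member names, in declaration order
def romanNames : List String :=
  ["I", "IV", "V", "IX", "X", "XL", "L", "XC", "C", "CD", "D", "CM", "M",
   "MV0", "V0", "X0", "X0L0", "L0", "C0", "C0D0", "D0", "M0", "M0V00",
   "V00", "X00", "X00L00", "L00", "C00", "C00D00", "D00", "M00"]

def romanTokens : List (List Char) := romanNames.map String.toList

-- `string[index:index+token_length] in RomanNumbers.__members__` (substring as char list)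
def memTok (l : List Char) : Bool := romanTokens.contains l

-- max(len(token.name) for token in RomanNumbers)
def maxTokenLength : Nat := (romanNames.map (fun t => t.toList.length)).foldl max 0

-- range(m, 0, -1) = [m, m-1, …, 1]
def descLens (m : Nat) : List Nat := (List.range m).map (fun i => m - i)

theorem descLens_pos {m ℓ : Nat} (h : ℓ ∈ descLens m) : 1 ≤ ℓ := by
  simp [descLens] at h; obtain ⟨i, hi, rfl⟩ := h; omega

-- the while loop of A: at each position try token lengths max..1, first hit wins,
-- else emit the single current character (slices with ℓ ≤ length are List.take)
def aLoop : List Char → List String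
  | [] => []
  | c :: rest =>
    match h : (descLens maxTokenLength).find?
        (fun ℓ => decide (ℓ ≤ (c :: rest).length) && memTok ((c :: rest).take ℓ)) with
    | some ℓ => String.ofList ((c :: rest).take ℓ) :: aLoop ((c :: rest).drop ℓ)
    | none => String.ofList [c] :: aLoop rest
termination_by cs => cs.length
decreasing_by
  all_goals simp
  all_goals (have h1 := descLens_pos (List.mem_of_find?_eq_some h); omega)

def input_string_into_special_list (string : String) : List String :=
  aLoop string.toList

-- ===== PORT B =====
-- _TOKENS = set(_NAMES); _PREFIXES = {name[:k+1] ...}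
def bTokens : PySem.Set (List Char) := PySem.Set.ofList (romanNames.map String.toList)

def bPrefixes : PySem.Set (List Char) :=
  PySem.Set.ofList ((romanNames.map String.toList).flatMap
    (fun t => (List.range t.length).map (fun k => t.take (k + 1))))

def memTokB (l : List Char) : Bool := PySem.Set.contains bTokens l
def memPre (l : List Char) : Bool := PySem.Set.contains bPrefixes l

-- the inner walk: extend the prefix while it stays in _PREFIXES, remember the
-- longest prefix that is a full token (0 = none found)
def walk (cs : List Char) (j best : Nat) : Nat :=
  if j < cs.length ∧ memPre (cs.take (j + 1)) = true then
    walk cs (j + 1) (if memTokB (cs.take (j + 1)) then j + 1 else best)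
  else best
termination_by cs.length - j

-- the outer while loop of B
def bLoop : List Char → List String
  | [] => []
  | c :: rest =>
    let best := walk (c :: rest) 0 0
    if h : best = 0 then String.ofList [c] :: bLoop rest
    else String.ofList ((c :: rest).take best) :: bLoop ((c :: rest).drop best)
termination_by cs => cs.length
decreasing_by
  all_goals simp
  all_goals omega

def input_string_into_special_list_alt (string : String) : List String :=
  bLoop string.toList

-- ===== PRECONDITION & SPEC =====
def Spec_input_string_into_special_list (string : String) (out : List String) : Prop := out = input_string_into_special_list_alt string
instance (string : String) (out : List String) : Decidable (Spec_input_string_into_special_list string out) := by unfold Spec_input_string_into_special_list; infer_instance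

-- ===== CLAIM (what is proved, stated in full; the proofs are below) =====
def Claim_equal_input_string_into_special_list : Prop := ∀ (string : String), Dom_input_string_into_special_list string → Spec_input_string_into_special_list string (input_string_into_special_list string)

-- ===== LEMMAS AND PROOFS =====

-- the two membership tests agree (set(_NAMES) keeps exactly the names)
set_option maxRecDepth 100000 in
theorem bTokens_eq : bTokens = romanTokens := by decide

theorem memTokB_eq (l : List Char) : memTokB l = memTok l := by
  rw [memTokB, bTokens_eq]; rfl

theorem descLens6 : descLens maxTokenLength = [6, 5, 4, 3, 2, 1] := by decide

-- every token has length ≤ 6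
theorem token_len_le {l : List Char} (h : memTok l = true) : l.length ≤ 6 := by
  have hm : l ∈ romanTokens := by simpa [memTok] using h
  have : ∀ t ∈ romanTokens, t.length ≤ 6 := by decide
  exact this l hm

-- every nonempty prefix of a token is in _PREFIXES
set_option maxRecDepth 100000 in
theorem prefix_mem {t : List Char} (ht : t ∈ romanTokens) {k : Nat} (hk : k < t.length) :
    memPre (t.take (k + 1)) = true := by
  have : ∀ t ∈ romanTokens, ∀ k, k < t.length → memPre (t.take (k + 1)) = true := by decide
  exact this t ht k hk

theorem walk_ge_best (cs : List Char) (j best : Nat) (hb : best ≤ j) :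
    best ≤ walk cs j best := by
  rw [walk]
  split
  · rename_i h
    by_cases ht : memTokB (cs.take (j + 1)) = true
    · rw [if_pos ht]
      have := walk_ge_best cs (j + 1) (j + 1) (le_refl _)
      omega
    · rw [if_neg ht]
      exact walk_ge_best cs (j + 1) best (by omega)
  · exact le_refl _
termination_by cs.length - j
decreasing_by all_goals (rename_i h _; omega)

theorem walk_cases (cs : List Char) (j best : Nat) (hb : best ≤ j) :
    walk cs j best = best ∨
      (j < walk cs j best ∧ walk cs j best ≤ cs.length ∧
        memTok (cs.take (walk cs j best)) = true) := by
  rw [walk]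
  split
  · rename_i h
    by_cases ht : memTokB (cs.take (j + 1)) = true
    · rw [if_pos ht]
      rcases walk_cases cs (j + 1) (j + 1) (le_refl _) with heq | ⟨h1, h2, h3⟩
      · right
        rw [heq]
        exact ⟨by omega, by omega, by rw [← memTokB_eq]; exact ht⟩
      · right; exact ⟨by omega, h2, h3⟩
    · rw [if_neg ht]
      rcases walk_cases cs (j + 1) best (by omega) with heq | ⟨h1, h2, h3⟩
      · left; exact heq
      · right; exact ⟨by omega, h2, h3⟩
  · left; rfl
termination_by cs.length - j
decreasing_by all_goals (rename_i h _; omega)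

theorem walk_ge_token (cs : List Char) (j best : Nat) (ℓ : Nat)
    (hj : j < ℓ) (hn : ℓ ≤ cs.length) (ht : memTok (cs.take ℓ) = true) :
    ℓ ≤ walk cs j best := by
  have hmem : cs.take ℓ ∈ romanTokens := by simpa [memTok] using ht
  have hlen : (cs.take ℓ).length = ℓ := by simp; omega
  have hpre : memPre (cs.take (j + 1)) = true := by
    have := prefix_mem hmem (k := j) (by omega)
    rwa [List.take_take, min_eq_left (by omega)] at this
  rw [walk]
  rw [if_pos ⟨by omega, hpre⟩]
  by_cases hℓ : ℓ = j + 1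
  · have htB : memTokB (cs.take (j + 1)) = true := by
      rw [memTokB_eq, ← hℓ]; exact ht
    simp only [htB, if_true]
    have := walk_ge_best cs (j + 1) (j + 1) (le_refl _)
    omega
  · exact walk_ge_token cs (j + 1) _ ℓ (by omega) hn ht
termination_by cs.length - j
decreasing_by omega

theorem find?_desc6 (p : Nat → Bool) (r : Nat) (h1 : 1 ≤ r) (h6 : r ≤ 6)
    (hp : p r = true) (hgt : ∀ ℓ, r < ℓ → ℓ ≤ 6 → p ℓ = false) :
    [6, 5, 4, 3, 2, 1].find? p = some r := by
  have g6 := fun h => hgt 6 h (by omega)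
  have g5 := fun h => hgt 5 h (by omega)
  have g4 := fun h => hgt 4 h (by omega)
  have g3 := fun h => hgt 3 h (by omega)
  have g2 := fun h => hgt 2 h (by omega)
  interval_cases r
  · simp [hp, g6 (by omega), g5 (by omega), g4 (by omega),
      g3 (by omega), g2 (by omega)]
  · simp [hp, g6 (by omega), g5 (by omega), g4 (by omega),
      g3 (by omega)]
  · simp [hp, g6 (by omega), g5 (by omega), g4 (by omega)]
  · simp [hp, g6 (by omega), g5 (by omega)]
  · simp [hp, g6 (by omega)]
  · simp [hp]

-- the first length found by A's descending probe equals B's walk result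
theorem step_eq (cs : List Char) :
    (descLens maxTokenLength).find?
        (fun ℓ => decide (ℓ ≤ cs.length) && memTok (cs.take ℓ)) =
      (if walk cs 0 0 = 0 then none else some (walk cs 0 0)) := by
  rw [descLens6]
  set r := walk cs 0 0 with hr
  by_cases h0 : r = 0
  · rw [if_pos h0]
    rw [List.find?_eq_none]
    intro ℓ hℓ
    simp only [Bool.and_eq_true, decide_eq_true_eq, not_and]
    intro hle ht
    have h1 : 1 ≤ ℓ := by
      simp at hℓ
      rcases hℓ with rfl | rfl | rfl | rfl | rfl | rfl <;> omega
    have := walk_ge_token cs 0 0 ℓ (by omega) hle ht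
    omega
  · rw [if_neg h0]
    rcases walk_cases cs 0 0 (le_refl _) with heq | ⟨hpos, hle, ht⟩
    · omega
    · rw [← hr] at hpos hle ht
      have h6 : r ≤ 6 := by
        have := token_len_le ht
        simp at this
        omega
      apply find?_desc6
      · omega
      · exact h6
      · simp only [Bool.and_eq_true, decide_eq_true_eq]
        exact ⟨hle, ht⟩
      · intro ℓ hgt hl6
        simp only [Bool.and_eq_false_iff, decide_eq_false_iff_not]
        by_cases hle' : ℓ ≤ cs.length
        · right
          by_cases ht' : memTok (cs.take ℓ) = true
          · have := walk_ge_token cs 0 0 ℓ (by omega) hle' ht'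
            omega
          · simpa using ht'
        · left; exact hle'

theorem loop_eq (cs : List Char) : aLoop cs = bLoop cs := by
  match cs with
  | [] => (unfold aLoop bLoop; rfl)
  | c :: rest =>
    rw [aLoop, bLoop]
    have hstep := step_eq (c :: rest)
    split
    · rename_i ℓ h
      rw [h] at hstep
      by_cases h0 : walk (c :: rest) 0 0 = 0
      · rw [if_pos h0] at hstep
        exact absurd hstep (by simp)
      · rw [if_neg h0] at hstep
        have hℓ : ℓ = walk (c :: rest) 0 0 := Option.some.inj hstep
        rw [dif_neg h0, ← hℓ]
        rw [loop_eq ((c :: rest).drop ℓ)]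
    · rename_i h
      rw [h] at hstep
      by_cases h0 : walk (c :: rest) 0 0 = 0
      · rw [dif_pos h0]
        rw [loop_eq rest]
      · rw [if_neg h0] at hstep
        exact absurd hstep (by simp)
termination_by cs.length
decreasing_by
  all_goals simp
  all_goals (rename_i heq; have h1 := descLens_pos (List.mem_of_find?_eq_some heq); omega)

-- ===== VERDICT (by name: the statement is the Claim_ definition above) =====
theorem input_string_into_special_list_spec : Claim_equal_input_string_into_special_list := by
  intro s _
  unfold Spec_input_string_into_special_list input_string_into_special_list input_string_into_special_list_alt
  exact loop_eq s.toList
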